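-- pv_equiv track=rewrite | github.com/ernestyalumni/HrdwCCppCUDA | Voltron/Voltron/Algorithms/level_easy.py | non_constructible_change_all_permutations
-- ===== SOURCE A (Python) =====
-- def non_constructible_change_all_permutations(coins):
--
--     if not coins:
--         return 1
--
--     # cf. https://docs.python.org/3/howto/sorting.html
--     # Python lists have built-in list.sort() method that modifies list in place.
--     coins.sort()
--
--     # Recognize that minimum_change is monotonically increasing with
--     # monotonically increasing coins.
--     minimum_change = 1
--
--     possible_change = set()
--
--     if coins[0] > minimum_change:
--
--         return minimum_change
--
--     for coin in coins:
--
--         # O(N!) space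
--
--         # O(N!) time copy.
--         possible_change_now = list(possible_change)
--
--         possible_change_now.sort()
--
--         for change in possible_change_now:
--
--             possible_change.add(change + coin)
--
--         possible_change.add(coin)
--
--         possible_change_now = list(possible_change)
--         possible_change_now.sort()
--
--         for change in possible_change_now:
--
--             if (minimum_change == change):
--                 minimum_change += 1
--
--     return minimum_change
-- ===== SOURCE B (Python) =====
-- def non_constructible_change_all_permutations(coins):
--     # Divide and conquer: subset sums (with the empty sum 0) of a list are the
--     # pairwise sums of the subset sums of its two halves; then one scan for the
--     # smallest positive integer missing from that set.
--     def sums0(part):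
--         if len(part) <= 1:
--             return {0} | set(part)
--         mid = len(part) // 2
--         return {a + b for a in sums0(part[:mid]) for b in sums0(part[mid:])}
--     s = sums0(coins)
--     m = 1
--     while m in s:
--         m += 1
--     return m
-- ===== Notes on version B (the rewrite author's own statement) =====
-- stated objective: alternative
-- what changed: B computes the subset-sum set by divide and conquer (the sums of a list, with 0 as the empty sum, are the pairwise sums of the sums of its two halves) and then finds the answer with one final scan from 1, instead of A's sorted left-to-right accumulation that copies and sorts the whole set twice per coin and bumps the counter inside the loop; B trades A's per-coin sorting passes for pairwise-sum merges, which cost more when the sum sets are large, so B is slower on large inputs.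
import Mathlib
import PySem

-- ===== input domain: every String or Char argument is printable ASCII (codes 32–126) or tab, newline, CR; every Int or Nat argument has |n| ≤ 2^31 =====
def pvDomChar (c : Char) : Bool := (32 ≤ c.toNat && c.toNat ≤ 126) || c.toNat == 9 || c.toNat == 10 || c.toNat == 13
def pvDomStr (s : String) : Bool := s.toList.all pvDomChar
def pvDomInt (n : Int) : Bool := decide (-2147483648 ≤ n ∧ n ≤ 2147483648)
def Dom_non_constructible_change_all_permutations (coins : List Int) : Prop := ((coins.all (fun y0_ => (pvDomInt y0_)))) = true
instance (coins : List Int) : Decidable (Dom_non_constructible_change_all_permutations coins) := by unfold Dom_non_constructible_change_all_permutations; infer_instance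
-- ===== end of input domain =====

-- B builds the subset-sum set by divide and conquer (pairwise sums of the two halves' sums, with 0
-- as the empty sum) and one final scan from 1, instead of A's sorted accumulation with per-coin
-- sorting/rescanning (objective: alternative). A sorts its argument in place; the equivalence
-- proved here is about the RETURN value only (B does not mutate its argument).

-- ===== PORT A =====
-- loop body of A's 'for coin in coins' (state: (possible_change, minimum_change))
def pvAStep (st : PySem.Set Int × Int) (coin : Int) : PySem.Set Int × Int :=
  let possible_change_now := PySem.List.sorted st.1 (fun x => x) false
  let possible_change :=
    possible_change_now.foldl (fun s change => PySem.Set.add s (change + coin)) st.1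
  let possible_change := PySem.Set.add possible_change coin
  let possible_change_now := PySem.List.sorted possible_change (fun x => x) false
  let minimum_change :=
    possible_change_now.foldl (fun m change => if m = change then m + 1 else m) st.2
  (possible_change, minimum_change)

def non_constructible_change_all_permutations (coins : List Int) : Int :=
  if coins = [] then 1
  else
    let coins := PySem.List.sorted coins (fun x => x) false
    let minimum_change : Int := 1
    if PySem.List.pyGetD coins 0 0 > minimum_change then minimum_change
    else (coins.foldl pvAStep (PySem.Set.empty, minimum_change)).2

-- ===== PORT B =====
-- B's 'sums0(part)': subset sums (including the empty sum 0) by divide and conquer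
def pvBSums (l : List Int) : PySem.Set Int :=
  if h : l.length ≤ 1 then PySem.Set.ofList (0 :: l)
  else
    let mid := l.length / 2
    let L := pvBSums (l.take mid)
    let R := pvBSums (l.drop mid)
    L.foldl (fun acc a => R.foldl (fun acc2 b => PySem.Set.add acc2 (a + b)) acc) PySem.Set.empty
termination_by l.length
decreasing_by
  · simp only [List.length_take]; omega
  · simp only [List.length_drop]; omega

-- B's 'while m in s: m += 1'; fuel s.length + 1 always suffices (proved below), so this is exact
def pvBMex (sums : PySem.Set Int) : Nat → Int → Int
  | 0, m => m
  | fuel + 1, m => if m ∈ sums then pvBMex sums fuel (m + 1) else m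

def non_constructible_change_all_permutations_alt (coins : List Int) : Int :=
  let s := pvBSums coins
  pvBMex s (s.length + 1) 1

-- ===== PRECONDITION & SPEC =====
def Spec_non_constructible_change_all_permutations (coins : List Int) (out : Int) : Prop := out = non_constructible_change_all_permutations_alt coins
instance (coins : List Int) (out : Int) : Decidable (Spec_non_constructible_change_all_permutations coins out) := by unfold Spec_non_constructible_change_all_permutations; infer_instance

-- ===== CLAIM (what is proved, stated in full; the proofs are below) =====
def Claim_equal_non_constructible_change_all_permutations : Prop := ∀ (coins : List Int), Dom_non_constructible_change_all_permutations coins → Spec_non_constructible_change_all_permutations coins (non_constructible_change_all_permutations coins)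

-- ===== LEMMAS AND PROOFS =====

-- membership through one A-loop step
theorem pvAStep_mem (pc : PySem.Set Int) (mc coin x : Int) :
    x ∈ (pvAStep (pc, mc) coin).1 ↔ x = coin ∨ x ∈ pc ∨ ∃ c ∈ pc, x = c + coin := by
  simp only [pvAStep, PySem.Set.mem_add, PySem.Set.mem_foldl_add, PySem.List.mem_sorted]
  constructor
  · rintro ((h | ⟨b, hb, rfl⟩) | rfl) <;> tauto
  · rintro (rfl | h | ⟨c, hc, rfl⟩)
    · tauto
    · tauto
    · exact Or.inl (Or.inr ⟨c, hc, rfl⟩)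

-- the abstract step on Finsets: adjoin a coin to a set of nonempty subset sums
def pvFStep (F : Finset Int) (c : Int) : Finset Int := insert c (F ∪ F.image (fun s => s + c))

theorem pvFStep_mem (F : Finset Int) (c x : Int) :
    x ∈ pvFStep F c ↔ x = c ∨ x ∈ F ∨ ∃ s ∈ F, x = s + c := by
  simp only [pvFStep, Finset.mem_insert, Finset.mem_union, Finset.mem_image]
  constructor
  · rintro (rfl | h | ⟨s, hs, rfl⟩) <;> tauto
  · rintro (rfl | h | ⟨s, hs, rfl⟩) <;> tauto

theorem pvFStep_comm (F : Finset Int) (a b : Int) :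
    pvFStep (pvFStep F a) b = pvFStep (pvFStep F b) a := by
  ext x
  simp only [pvFStep_mem]
  constructor <;>
  · rintro (rfl | (rfl | h | ⟨s, hs, rfl⟩) | ⟨s, hs1, rfl⟩)
    · tauto
    · tauto
    · tauto
    · right; right; exact ⟨s, Or.inr (Or.inl hs), rfl⟩
    · rcases hs1 with rfl | hs | ⟨t, ht, rfl⟩
      · right; right; exact ⟨_, Or.inl rfl, add_comm _ _⟩
      · right; left; right; right; exact ⟨s, hs, rfl⟩
      · right; right; refine ⟨t + _, Or.inr (Or.inr ⟨t, ht, rfl⟩), by ring⟩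

theorem pvAStep_toFinset (pc : PySem.Set Int) (mc coin : Int) :
    (pvAStep (pc, mc) coin).1.toFinset = pvFStep pc.toFinset coin := by
  ext x
  rw [List.mem_toFinset, pvAStep_mem, pvFStep_mem]
  simp only [List.mem_toFinset]

theorem pvAFold_toFinset (l : List Int) :
    ∀ (st : PySem.Set Int × Int),
      (l.foldl pvAStep st).1.toFinset = l.foldl pvFStep st.1.toFinset := by
  induction l with
  | nil => intro st; rfl
  | cons c t ih =>
      intro st
      simp only [List.foldl_cons]
      rw [ih (pvAStep st c)]
      rw [show pvAStep st c = pvAStep (st.1, st.2) c from rfl, pvAStep_toFinset]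

-- Minkowski (pairwise) sum of finite sets of integers
def pvMink (A B : Finset Int) : Finset Int := A.biUnion (fun a => B.image (fun b => a + b))

theorem pvMink_mem (A B : Finset Int) (x : Int) :
    x ∈ pvMink A B ↔ ∃ a ∈ A, ∃ b ∈ B, x = a + b := by
  simp only [pvMink, Finset.mem_biUnion, Finset.mem_image]
  constructor
  · rintro ⟨a, ha, b, hb, rfl⟩; exact ⟨a, ha, b, hb, rfl⟩
  · rintro ⟨a, ha, b, hb, rfl⟩; exact ⟨a, ha, b, hb, rfl⟩

theorem pvMink_zero_left (B : Finset Int) : pvMink {0} B = B := by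
  ext x; simp only [pvMink_mem, Finset.mem_singleton]
  constructor
  · rintro ⟨a, rfl, b, hb, rfl⟩; simpa using hb
  · intro hx; exact ⟨0, rfl, x, hx, (zero_add x).symm⟩

theorem pvMink_zero_right (A : Finset Int) : pvMink A {0} = A := by
  ext x; simp only [pvMink_mem, Finset.mem_singleton]
  constructor
  · rintro ⟨a, ha, b, rfl, rfl⟩; simpa using ha
  · intro hx; exact ⟨x, hx, 0, rfl, (add_zero x).symm⟩

theorem pvMink_assoc (A B C : Finset Int) : pvMink (pvMink A B) C = pvMink A (pvMink B C) := by
  ext x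
  simp only [pvMink_mem]
  constructor
  · rintro ⟨ab, ⟨a, ha, b, hb, rfl⟩, c, hc, rfl⟩
    exact ⟨a, ha, b + c, ⟨b, hb, c, hc, rfl⟩, (add_assoc a b c)⟩
  · rintro ⟨a, ha, bc, ⟨b, hb, c, hc, rfl⟩, rfl⟩
    exact ⟨a + b, ⟨a, ha, b, hb, rfl⟩, c, hc, (add_assoc a b c).symm⟩

-- one pvFStep, with 0 adjoined, is a Minkowski product with {0, c}
theorem pvFStep_mink (S : Finset Int) (c : Int) :
    insert (0 : Int) (pvFStep S c) = pvMink (insert 0 S) (insert 0 {c}) := by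
  ext x
  simp only [Finset.mem_insert, pvFStep_mem, pvMink_mem, Finset.mem_insert, Finset.mem_singleton]
  constructor
  · rintro (rfl | rfl | h | ⟨s, hs, rfl⟩)
    · exact ⟨0, Or.inl rfl, 0, Or.inl rfl, by ring⟩
    · exact ⟨0, Or.inl rfl, _, Or.inr rfl, by ring⟩
    · exact ⟨x, Or.inr h, 0, Or.inl rfl, by ring⟩
    · exact ⟨s, Or.inr hs, c, Or.inr rfl, rfl⟩
  · rintro ⟨a, ha, b, hb, rfl⟩
    rcases ha with rfl | ha <;> rcases hb with rfl | rfl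
    · left; ring
    · right; left; ring
    · right; right; left; simpa using ha
    · right; right; right; exact ⟨a, ha, rfl⟩

-- fold of pvFStep, with 0 adjoined, as a fold of Minkowski products
theorem pvFold_mink (t : List Int) :
    ∀ (S : Finset Int),
      insert (0 : Int) (t.foldl pvFStep S) =
        t.foldl (fun A c => pvMink A (insert 0 {c})) (insert 0 S) := by
  induction t with
  | nil => intro S; rfl
  | cons c t ih =>
      intro S
      simp only [List.foldl_cons]
      rw [ih (pvFStep S c), pvFStep_mink]

-- fold of Minkowski products from any start is one Minkowski product
theorem pvMinkFold (t : List Int) :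
    ∀ (A : Finset Int),
      t.foldl (fun A c => pvMink A (insert 0 {c})) A =
        pvMink A (t.foldl (fun A c => pvMink A (insert 0 {c})) {0}) := by
  induction t with
  | nil => intro A; simp only [List.foldl_nil]; rw [pvMink_zero_right]
  | cons c t ih =>
      intro A
      simp only [List.foldl_cons]
      rw [ih (pvMink A (insert 0 {c})), pvMink_assoc, pvMink_zero_left, ← ih (insert 0 {c})]

-- the subset sums of a list, with 0
def pvF0 (l : List Int) : Finset Int := insert 0 (l.foldl pvFStep ∅)

theorem pvF0_append (l1 l2 : List Int) : pvF0 (l1 ++ l2) = pvMink (pvF0 l1) (pvF0 l2) := by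
  have h0 : (insert (0 : Int) (∅ : Finset Int)) = {0} := rfl
  unfold pvF0
  rw [pvFold_mink, h0, List.foldl_append, pvMinkFold (l2), pvFold_mink, pvFold_mink, h0]

-- membership in B's nested set-building fold
theorem pvBDouble_mem (L R : List Int) (x : Int) :
    ∀ (s : PySem.Set Int),
      x ∈ L.foldl (fun acc a => R.foldl (fun acc2 b => PySem.Set.add acc2 (a + b)) acc) s ↔
        x ∈ s ∨ ∃ a ∈ L, ∃ b ∈ R, x = a + b := by
  induction L with
  | nil => intro s; simp
  | cons a t ih =>
      intro s
      simp only [List.foldl_cons]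
      rw [ih]
      have hin : x ∈ R.foldl (fun acc2 b => PySem.Set.add acc2 (a + b)) s ↔
          x ∈ s ∨ ∃ b ∈ R, x = a + b := PySem.Set.mem_foldl_add R (fun b => a + b) s x
      rw [hin]
      constructor
      · rintro ((h | ⟨b, hb, rfl⟩) | ⟨a', ha', b, hb, rfl⟩)
        · exact Or.inl h
        · exact Or.inr ⟨a, List.mem_cons_self, b, hb, rfl⟩
        · exact Or.inr ⟨a', List.mem_cons_of_mem _ ha', b, hb, rfl⟩
      · rintro (h | ⟨a', ha', b, hb, rfl⟩)
        · exact Or.inl (Or.inl h)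
        · rcases List.mem_cons.mp ha' with rfl | ha'
          · exact Or.inl (Or.inr ⟨b, hb, rfl⟩)
          · exact Or.inr ⟨a', ha', b, hb, rfl⟩

-- B's recursion computes exactly pvF0
theorem pvBSums_toFinset (l : List Int) : (pvBSums l).toFinset = pvF0 l := by
  induction l using pvBSums.induct with
  | case1 l h =>
      rw [pvBSums, dif_pos h]
      interval_cases hl : l.length
      · rw [List.length_eq_zero_iff.mp hl]
        ext x
        simp [pvF0, PySem.Set.mem_ofList]
      · obtain ⟨c, rfl⟩ := List.length_eq_one_iff.mp hl
        ext x
        simp only [List.mem_toFinset, PySem.Set.mem_ofList, List.mem_cons, List.not_mem_nil,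
          or_false, pvF0, List.foldl_cons, List.foldl_nil, Finset.mem_insert, pvFStep_mem,
          Finset.notMem_empty, false_or]
        tauto
  | case2 l h mid ihL ihR =>
      have hmid : mid = l.length / 2 := rfl
      rw [hmid] at ihL ihR
      rw [pvBSums, dif_neg h]
      ext x
      rw [List.mem_toFinset, pvBDouble_mem]
      have hsplit : l = l.take (l.length / 2) ++ l.drop (l.length / 2) := (List.take_append_drop _ _).symm
      rw [show pvF0 l = pvF0 (l.take (l.length / 2) ++ l.drop (l.length / 2)) from by rw [← hsplit]]
      rw [pvF0_append, pvMink_mem]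
      simp only [PySem.Set.empty, List.not_mem_nil, false_or]
      constructor
      · rintro ⟨a, ha, b, hb, rfl⟩
        exact ⟨a, by rw [← ihL, List.mem_toFinset]; exact ha,
               b, by rw [← ihR, List.mem_toFinset]; exact hb, rfl⟩
      · rintro ⟨a, ha, b, hb, rfl⟩
        exact ⟨a, by rw [← List.mem_toFinset, ihL]; exact ha,
               b, by rw [← List.mem_toFinset, ihR]; exact hb, rfl⟩

-- the two programs' sets agree on nonzero elements (A folds the sorted coins; B adjoins 0)
theorem pv_sets_agree (coins : List Int) (x : Int) (hx : x ≠ 0) :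
    x ∈ ((PySem.List.sorted coins (fun x => x) false).foldl pvAStep (PySem.Set.empty, 1)).1 ↔
    x ∈ pvBSums coins := by
  rw [← List.mem_toFinset, ← List.mem_toFinset, pvAFold_toFinset, pvBSums_toFinset]
  have hperm : (PySem.List.sorted coins (fun x => x) false).Perm coins :=
    PySem.List.sorted_perm coins (fun x => x) false
  have : ((PySem.Set.empty : PySem.Set Int).toFinset) = (∅ : Finset Int) := rfl
  rw [this, hperm.foldl_eq' (fun a _ b _ F => pvFStep_comm F a b)]
  unfold pvF0
  simp [Finset.mem_insert, hx]

-- nodup is preserved by A's loop step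
theorem pvAStep_nodup (pc : PySem.Set Int) (mc coin : Int) (h : pc.Nodup) :
    (pvAStep (pc, mc) coin).1.Nodup := by
  apply PySem.Set.nodup_add
  have : ∀ (l : List Int) (s : PySem.Set Int), s.Nodup →
      (l.foldl (fun s change => PySem.Set.add s (change + coin)) s).Nodup := by
    intro l
    induction l with
    | nil => intro s hs; exact hs
    | cons a t ih => intro s hs; exact ih _ (PySem.Set.nodup_add s (a + coin) hs)
  exact this _ pc h

-- A's inner sorted scan: bumps the counter along the consecutive run present in the list
theorem pv_scan_spec (L : List Int) (hL : L.Pairwise (· < ·)) :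
    ∀ (mc : Int),
      (L.foldl (fun m change => if m = change then m + 1 else m) mc) ∉ L ∧
      mc ≤ L.foldl (fun m change => if m = change then m + 1 else m) mc ∧
      ∀ k, mc ≤ k → k < L.foldl (fun m change => if m = change then m + 1 else m) mc → k ∈ L := by
  induction L with
  | nil => intro mc; exact ⟨by simp, le_refl _, fun k h1 h2 => absurd (lt_of_le_of_lt h1 h2) (lt_irrefl _)⟩
  | cons h t ih =>
      rcases List.pairwise_cons.mp hL with ⟨hht, ht⟩
      intro mc
      simp only [List.foldl_cons]
      by_cases hmh : mc = h
      · subst hmh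
        rw [if_pos rfl]
        obtain ⟨r1, r2, r3⟩ := ih ht (mc + 1)
        refine ⟨?_, by omega, ?_⟩
        · simp only [List.mem_cons, not_or]
          exact ⟨by omega, r1⟩
        · intro k hk1 hk2
          by_cases hkm : k = mc
          · subst hkm; exact List.mem_cons_self
          · exact List.mem_cons_of_mem _ (r3 k (by omega) hk2)
      · simp only [if_neg hmh]
        obtain ⟨r1, r2, r3⟩ := ih ht mc
        set r := t.foldl (fun m change => if m = change then m + 1 else m) mc with hr
        refine ⟨?_, r2, fun k hk1 hk2 => List.mem_cons_of_mem _ (r3 k hk1 hk2)⟩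
        simp only [List.mem_cons, not_or]
        refine ⟨?_, r1⟩
        by_cases hrm : r = mc
        · omega
        · have hmc : mc ∈ t := r3 mc le_rfl (by omega)
          have := hht mc hmc
          omega

-- strict sortedness of sorted(s) for a nodup s
theorem pv_sorted_strict (s : PySem.Set Int) (h : s.Nodup) :
    (PySem.List.sorted s (fun x => x) false).Pairwise (· < ·) := by
  have hperm : (PySem.List.sorted s (fun x => x) false).Perm s :=
    PySem.List.sorted_perm s (fun x => x) false
  have hnd : (PySem.List.sorted s (fun x => x) false).Nodup := hperm.nodup_iff.mpr h
  have hle : (PySem.List.sorted s (fun x => x) false).Pairwise (fun a b => a ≤ b) :=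
    PySem.List.sorted_pairwise s (fun x => x)
  exact (hle.and hnd).imp (fun hab => lt_of_le_of_ne hab.1 hab.2)

-- A's loop invariant
def pvInv (st : PySem.Set Int × Int) : Prop :=
  st.1.Nodup ∧ 1 ≤ st.2 ∧ st.2 ∉ st.1 ∧ ∀ k, 1 ≤ k → k < st.2 → k ∈ st.1

theorem pvAStep_inv (st : PySem.Set Int × Int) (coin : Int) (h : pvInv st) :
    pvInv (pvAStep st coin) := by
  obtain ⟨hnd, h1, _hmem, hlow⟩ := h
  obtain ⟨pc, mc⟩ := st
  have hnd' : (pvAStep (pc, mc) coin).1.Nodup := pvAStep_nodup pc mc coin hnd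
  have hstrict := pv_sorted_strict (pvAStep (pc, mc) coin).1 hnd'
  obtain ⟨r1, r2, r3⟩ := pv_scan_spec _ hstrict mc
  have hmemsort : ∀ x, x ∈ PySem.List.sorted (pvAStep (pc, mc) coin).1 (fun x => x) false ↔
      x ∈ (pvAStep (pc, mc) coin).1 := fun x => PySem.List.mem_sorted _ _ _ _
  have h2eq : (pvAStep (pc, mc) coin).2 =
      (PySem.List.sorted (pvAStep (pc, mc) coin).1 (fun x => x) false).foldl
        (fun m change => if m = change then m + 1 else m) mc := rfl
  refine ⟨hnd', by omega, ?_, ?_⟩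
  · rw [h2eq]; intro hmem; exact r1 ((hmemsort _).mpr hmem)
  · intro k hk1 hk2
    rw [h2eq] at hk2
    by_cases hkm : k < mc
    · have : k ∈ pc := hlow k hk1 hkm
      exact (pvAStep_mem pc mc coin k).mpr (Or.inr (Or.inl this))
    · exact (hmemsort k).mp (r3 k (by omega) hk2)

theorem pvAFold_inv (l : List Int) :
    ∀ (st : PySem.Set Int × Int), pvInv st → pvInv (l.foldl pvAStep st) := by
  induction l with
  | nil => intro st h; exact h
  | cons c t ih => intro st h; exact ih _ (pvAStep_inv st c h)

-- B's mex loop: with a gap inside the fuel window, it finds the first gap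
theorem pvBMex_spec (s : PySem.Set Int) :
    ∀ (fuel : Nat) (m : Int), (∃ j, m ≤ j ∧ j < m + fuel ∧ j ∉ s) →
      pvBMex s fuel m ∉ s ∧ m ≤ pvBMex s fuel m ∧
      ∀ k, m ≤ k → k < pvBMex s fuel m → k ∈ s := by
  intro fuel
  induction fuel with
  | zero => intro m ⟨j, h1, h2, _⟩; omega
  | succ n ih =>
      intro m ⟨j, h1, h2, h3⟩
      by_cases hm : m ∈ s
      · have hj : m + 1 ≤ j := by
          rcases eq_or_lt_of_le h1 with rfl | h
          · exact absurd hm h3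
          · omega
        obtain ⟨r1, r2, r3⟩ := ih (m + 1) ⟨j, hj, by omega, h3⟩
        simp only [pvBMex, if_pos hm]
        refine ⟨r1, by omega, ?_⟩
        intro k hk1 hk2
        by_cases hkm : k = m
        · subst hkm; exact hm
        · exact r3 k (by omega) hk2
      · simp only [pvBMex, if_neg hm]
        exact ⟨hm, le_refl _, fun k h1 h2 => by omega⟩

-- there is a gap within length+1 steps (pigeonhole)
theorem pv_gap_exists (s : PySem.Set Int) (m : Int) :
    ∃ j, m ≤ j ∧ j < m + (s.length + 1 : Nat) ∧ j ∉ s := by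
  by_contra h
  push Not at h
  have hall : ∀ i : Nat, i < s.length + 1 → (m + i) ∈ s := by
    intro i hi
    exact h (m + i) (by omega) (by push_cast; omega)
  set L : List Int := (List.range (s.length + 1)).map (fun i : Nat => m + (i : Int)) with hLdef
  have hinj : Function.Injective (fun i : Nat => m + (i : Int)) := by
    intro a b hab
    simp only at hab
    omega
  have hLnd : L.Nodup := List.Nodup.map hinj (List.nodup_range)
  have hLsub : L ⊆ s := by
    intro x hx
    rw [hLdef] at hx
    simp only [List.mem_map, List.mem_range] at hx
    obtain ⟨i, hi, rfl⟩ := hx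
    exact hall i hi
  have h1 : L.toFinset.card = L.length := List.toFinset_card_of_nodup hLnd
  have h2 : L.toFinset ⊆ s.toFinset := by
    intro x hx
    rw [List.mem_toFinset] at hx ⊢
    exact hLsub hx
  have h3 : s.toFinset.card ≤ s.length := List.toFinset_card_le s
  have h4 : L.length = s.length + 1 := by simp [hLdef]
  have := Finset.card_le_card h2
  omega

-- all nonempty subset sums are ≥ 2 when all coins are ≥ 2 (for A's early-return branch)
theorem pvFFold_lower (l : List Int) (hl : ∀ c ∈ l, 2 ≤ c) :
    ∀ (S : Finset Int), (∀ x ∈ S, 2 ≤ x) →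
      ∀ x ∈ l.foldl pvFStep S, 2 ≤ x := by
  induction l with
  | nil => intro S hS; exact hS
  | cons c t ih =>
      intro S hS x hx
      have hc : 2 ≤ c := hl c List.mem_cons_self
      refine ih (fun d hd => hl d (List.mem_cons_of_mem _ hd)) (pvFStep S c) ?_ x hx
      intro y hy
      rcases (pvFStep_mem S c y).mp hy with rfl | hy | ⟨d, hd, rfl⟩
      · exact hc
      · exact hS y hy
      · have := hS d hd; omega

-- B equals the first gap from 1 of the set it builds
theorem pvAlt_char (coins : List Int) :
    non_constructible_change_all_permutations_alt coins ∉ pvBSums coins ∧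
    1 ≤ non_constructible_change_all_permutations_alt coins ∧
    ∀ k, 1 ≤ k → k < non_constructible_change_all_permutations_alt coins →
      k ∈ pvBSums coins := by
  exact pvBMex_spec _ _ 1 (pv_gap_exists _ 1)

-- ===== VERDICT (by name: the statement is the Claim_ definition above) =====
theorem non_constructible_change_all_permutations_spec : Claim_equal_non_constructible_change_all_permutations := by
  intro coins _
  unfold Spec_non_constructible_change_all_permutations
  obtain ⟨b1, b2, b3⟩ := pvAlt_char coins
  by_cases hnil : coins = []
  · subst hnil
    have hA : non_constructible_change_all_permutations [] = 1 := rfl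
    rw [hA]
    by_contra hne
    have h1lt : 1 < non_constructible_change_all_permutations_alt [] := by omega
    have h1mem := b3 1 le_rfl h1lt
    rw [← List.mem_toFinset, pvBSums_toFinset] at h1mem
    rcases Finset.mem_insert.mp h1mem with h0 | h0
    · omega
    · exact absurd h0 (Finset.notMem_empty 1)
  · unfold non_constructible_change_all_permutations
    rw [if_neg hnil]
    by_cases hhead : PySem.List.pyGetD (PySem.List.sorted coins (fun x => x) false) 0 0 > 1
    · simp only [if_pos hhead]
      -- all coins ≥ 2, so 1 is not a subset sum and B returns 1
      obtain ⟨m, t, hmt⟩ : ∃ m t, PySem.List.sorted coins (fun x => x) false = m :: t := by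
        rcases hs : PySem.List.sorted coins (fun x => x) false with _ | ⟨m, t⟩
        · exact absurd ((PySem.List.sorted_eq_nil_iff coins (fun x => x) false).mp hs) hnil
        · exact ⟨m, t, rfl⟩
      have hm1 : 1 < m := by
        have : PySem.List.pyGetD (m :: t) 0 0 = m := by
          simp [PySem.List.pyGetD, PySem.List.pyGet?, PySem.List.pyIdx?]
        rw [hmt, this] at hhead; exact hhead
      have hge2 : ∀ c ∈ coins, 2 ≤ c := by
        intro c hc
        have := PySem.List.key_head_sorted_le coins (fun x => x) hmt c hc
        simp only at this
        omega
      have h1notin : (1 : Int) ∉ pvBSums coins := by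
        intro hmem
        rw [← List.mem_toFinset, pvBSums_toFinset] at hmem
        unfold pvF0 at hmem
        rcases Finset.mem_insert.mp hmem with h0 | hmem
        · omega
        · have := pvFFold_lower coins hge2 ∅ (by intro x hx; cases (Finset.notMem_empty x hx)) 1 hmem
          omega
      have : non_constructible_change_all_permutations_alt coins = 1 := by
        by_contra hne
        have h1lt : 1 < non_constructible_change_all_permutations_alt coins := by omega
        exact h1notin (b3 1 le_rfl h1lt)
      omega
    · simp only [if_neg hhead]
      obtain ⟨_, a1, a2, a3⟩ := pvAFold_inv (PySem.List.sorted coins (fun x => x) false)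
        (PySem.Set.empty, 1) ⟨List.nodup_nil, le_refl 1, by simp [PySem.Set.empty], by intro k h1 h2; omega⟩
      set stA := (PySem.List.sorted coins (fun x => x) false).foldl pvAStep (PySem.Set.empty, 1) with hstA
      set rB := non_constructible_change_all_permutations_alt coins with hrB
      rcases lt_trichotomy stA.2 rB with h | h | h
      · exact absurd ((pv_sets_agree coins stA.2 (by omega)).mpr (b3 stA.2 a1 h)) a2
      · exact h
      · exact absurd ((pv_sets_agree coins rB (by omega)).mp (a3 rB b2 h)) b1
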